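-- pv_equiv track=rewrite | github.com/sangeun-lim/TIL | BOJ_silver/9095_123더하기.py | f
-- ===== SOURCE A (Python) =====
-- def f(x):
--     if x==1:
--         return 1
--     elif x==2:
--         return 2
--     elif x==3:
--         return 4
--     else:
--         return f(x-1)+f(x-2)+f(x-3)
-- ===== SOURCE B (Python) =====
-- def f(x):
--     a, b, c = 1, 2, 4
--     for _ in range(x - 1):
--         a, b, c = b, c, a + b + c
--     return a
-- ===== Notes on version B (the rewrite author's own statement) =====
-- stated objective: faster
-- what changed: Replaced the triple-branching recursion with a bottom-up iteration keeping a sliding window of the last three tribonacci values; intended as faster (O(x) vs O(3^x)): a timing run saw A time out where B answered in under a millisecond, though with too few both-finished inputs to always confirm the label.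
-- outside the precondition, e.g. on f(0): A raises RecursionError, B returns 1
import Mathlib
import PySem

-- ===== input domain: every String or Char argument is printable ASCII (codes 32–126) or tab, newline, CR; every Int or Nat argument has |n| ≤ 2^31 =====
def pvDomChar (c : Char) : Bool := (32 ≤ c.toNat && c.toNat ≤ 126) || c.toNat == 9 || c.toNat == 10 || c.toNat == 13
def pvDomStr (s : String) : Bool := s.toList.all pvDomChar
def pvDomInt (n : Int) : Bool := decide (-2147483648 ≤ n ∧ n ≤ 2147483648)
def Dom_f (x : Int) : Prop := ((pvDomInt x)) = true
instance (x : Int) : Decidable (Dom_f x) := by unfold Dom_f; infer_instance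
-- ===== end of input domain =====

-- B replaces A's triple recursion by a bottom-up sliding-window iteration, intended as faster; in a timing run A timed out where B answered.
-- ===== PORT A =====
-- A's recursion on Int diverges for x ≤ 0 (excluded by Pre_f); the port recurses on x.toNat,
-- literally mirroring A's branches and its three recursive calls.
def fA : Nat → Int
  | 0 => 0            -- unreachable under Pre_f (A diverges for x ≤ 0)
  | 1 => 1
  | 2 => 2
  | 3 => 4
  | (n + 4) => fA (n + 3) + fA (n + 2) + fA (n + 1)

def f (x : Int) : Int := if x ≤ 0 then 0 else fA x.toNat

-- ===== PORT B =====
-- for _ in range(x-1): a,b,c = b,c,a+b+c ; return a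
def f_alt (x : Int) : Int :=
  ((List.range (x - 1).toNat).foldl
    (fun (t : Int × Int × Int) _ => (t.2.1, t.2.2, t.1 + t.2.1 + t.2.2))
    (1, 2, 4)).1

-- ===== PRECONDITION & SPEC =====
-- Pre_f excludes x ≤ 0, where the Python A recurses without bound (RecursionError), e.g. at x = 0 (B returns 1 there).
def Pre_f (x : Int) : Prop := 1 ≤ x
instance (x : Int) : Decidable (Pre_f x) := by unfold Pre_f; infer_instance
def pvWitness_f : Int := 5

def Spec_f (x : Int) (out : Int) : Prop := out = f_alt x
instance (x : Int) (out : Int) : Decidable (Spec_f x out) := by unfold Spec_f; infer_instance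

-- ===== CLAIM =====
def Claim_equal_f : Prop := ∀ (x : Int), Dom_f x → Pre_f x → Spec_f x (f x)

-- ===== LEMMAS AND PROOFS =====
def gIter (k : Nat) : Int × Int × Int :=
  (List.range k).foldl
    (fun (t : Int × Int × Int) _ => (t.2.1, t.2.2, t.1 + t.2.1 + t.2.2)) (1, 2, 4)

theorem gIter_succ (k : Nat) :
    gIter (k + 1) = ((gIter k).2.1, (gIter k).2.2, (gIter k).1 + (gIter k).2.1 + (gIter k).2.2) := by
  simp [gIter, List.range_succ]

theorem gIter_eq (k : Nat) : gIter k = (fA (k + 1), fA (k + 2), fA (k + 3)) := by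
  induction k with
  | zero => simp [gIter, fA]
  | succ n ih =>
      rw [gIter_succ, ih]
      show (fA (n + 2), fA (n + 3), fA (n + 1) + fA (n + 2) + fA (n + 3)) = _
      have : fA (n + 4) = fA (n + 3) + fA (n + 2) + fA (n + 1) := rfl
      simp [this]; ring

-- ===== VERDICT =====
theorem f_spec : Claim_equal_f := by
  intro x _ hx
  unfold Pre_f at hx
  unfold Spec_f f f_alt
  have hx0 : ¬ x ≤ 0 := by omega
  rw [if_neg hx0]
  have hk : x.toNat = (x - 1).toNat + 1 := by omega
  rw [hk]
  show fA ((x - 1).toNat + 1) = (gIter ((x - 1).toNat)).1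
  rw [gIter_eq]
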